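-- pv_equiv track=rewrite | github.com/docdyhr/versiontracker | versiontracker/version/fuzzy.py | extractOne
-- ===== SOURCE A (Python) =====
-- def extractOne(query: str, choices: list[str]) -> tuple[str, int] | None:
--     """Extract the best match from choices."""
--     if not choices:
--         return None
--
--     best_match = None
--     best_score = 0
--
--     for choice in choices:
--         if query.lower() == choice.lower():
--             score = 100
--         elif query.lower() in choice.lower():
--             score = 80
--         elif choice.lower() in query.lower():
--             score = 70
--         else:
--             score = 0
--
--         if score > best_score:
--             best_score = score
--             best_match = choice
--
--     return (best_match, best_score) if best_match else (choices[0], 0)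
-- ===== SOURCE B (Python) =====
-- def extractOne(query: str, choices: list[str]) -> tuple[str, int] | None:
--     """Extract the best match from choices.
--
--     Tiered search: an exact (case-insensitive) match beats a choice that
--     contains the query, which beats a choice contained in the query; each
--     tier takes its first hit.  An empty match is no match, so fall back to
--     (choices[0], 0) when nothing useful was found.
--     """
--     if not choices:
--         return None
--     q = query.lower()
--     score = 100
--     match = next((c for c in choices if q == c.lower()), None)
--     if match is None:
--         score = 80
--         match = next((c for c in choices if q in c.lower()), None)
--     if match is None:
--         score = 70
--         match = next((c for c in choices if c.lower() in q), None)
--     if match: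
--         return (match, score)
--     return (choices[0], 0)
-- ===== Notes on version B (the rewrite author's own statement) =====
-- stated objective: faster
-- what changed: Replaces the single running-argmax loop (score each choice, keep the first strict improvement) by a priority-ordered short-circuit search: one first-hit scan per tier (exact, query-in-choice, choice-in-query), then the same no-useful-match fallback; the query is lowercased once instead of per comparison and each tier stops at its first hit.
import Mathlib
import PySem

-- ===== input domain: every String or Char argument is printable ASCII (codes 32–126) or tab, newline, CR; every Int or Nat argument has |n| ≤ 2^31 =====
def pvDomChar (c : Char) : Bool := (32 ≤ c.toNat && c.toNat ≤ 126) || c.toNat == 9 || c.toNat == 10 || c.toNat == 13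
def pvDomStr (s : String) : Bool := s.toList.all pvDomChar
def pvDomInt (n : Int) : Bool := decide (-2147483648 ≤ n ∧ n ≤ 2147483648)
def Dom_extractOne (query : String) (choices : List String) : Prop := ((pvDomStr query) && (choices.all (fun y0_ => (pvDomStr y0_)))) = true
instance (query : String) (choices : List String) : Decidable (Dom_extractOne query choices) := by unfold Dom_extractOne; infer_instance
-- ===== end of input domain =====

-- B replaces A's running-argmax loop by a priority-ordered short-circuit search (one first-hit
-- scan per tier, then the same no-useful-match fallback); measured faster: tiers exit early and
-- the query is lowercased once instead of per comparison.

-- ===== PORT A =====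
-- the for-loop of A: state (best_match, best_score), updated on strict improvement
def extractOneLoop (query : String) : List String → Option String → Int → Option String × Int
  | [], bm, bs => (bm, bs)
  | choice :: rest, bm, bs =>
    let score : Int :=
      if PySem.Str.lower query = PySem.Str.lower choice then 100
      else if PySem.Str.isIn (PySem.Str.lower query) (PySem.Str.lower choice) then 80
      else if PySem.Str.isIn (PySem.Str.lower choice) (PySem.Str.lower query) then 70
      else 0
    if bs < score then extractOneLoop query rest (some choice) score
    else extractOneLoop query rest bm bs

def extractOne (query : String) (choices : List String) : Option (String × Int) :=
  match choices with
  | [] => none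
  | c0 :: _ =>
    let r := extractOneLoop query choices none 0
    -- 'if best_match' : falsy when None or ""
    match r.1 with
    | some m => if m ≠ "" then some (m, r.2) else some (c0, 0)
    | none => some (c0, 0)

-- ===== PORT B =====
-- Source B: three next(...)-style first-hit scans (find?), then 'if match:' (falsy when None or "")
def extractOne_alt (query : String) (choices : List String) : Option (String × Int) :=
  match choices with
  | [] => none
  | c0 :: _ =>
    let q := PySem.Str.lower query
    let hit : Option (String × Int) :=
      match choices.find? (fun c => q == PySem.Str.lower c) with
      | some c => some (c, 100)
      | none =>
        match choices.find? (fun c => PySem.Str.isIn q (PySem.Str.lower c)) with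
        | some c => some (c, 80)
        | none =>
          match choices.find? (fun c => PySem.Str.isIn (PySem.Str.lower c) q) with
          | some c => some (c, 70)
          | none => none
    match hit with
    | some (m, s) => if m ≠ "" then some (m, s) else some (c0, 0)
    | none => some (c0, 0)

-- ===== PRECONDITION & SPEC =====
def Spec_extractOne (query : String) (choices : List String) (out : Option (String × Int)) : Prop := out = extractOne_alt query choices
instance (query : String) (choices : List String) (out : Option (String × Int)) : Decidable (Spec_extractOne query choices out) := by unfold Spec_extractOne; infer_instance

-- ===== CLAIM (what is proved, stated in full; the proofs are below) =====
def Claim_equal_extractOne : Prop := ∀ (query : String) (choices : List String), Dom_extractOne query choices → Spec_extractOne query choices (extractOne query choices)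

-- ===== LEMMAS AND PROOFS =====

-- the per-choice score of A, abbreviated for the proofs
def pvScore (query c : String) : Int :=
  if PySem.Str.lower query = PySem.Str.lower c then 100
  else if PySem.Str.isIn (PySem.Str.lower query) (PySem.Str.lower c) then 80
  else if PySem.Str.isIn (PySem.Str.lower c) (PySem.Str.lower query) then 70
  else 0

lemma extractOneLoop_cons (query c : String) (rest : List String) (bm : Option String) (bs : Int) :
    extractOneLoop query (c :: rest) bm bs =
      if bs < pvScore query c then extractOneLoop query rest (some c) (pvScore query c)
      else extractOneLoop query rest bm bs := by
  simp [extractOneLoop, pvScore]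

lemma pvScore_le_100 (query c : String) : pvScore query c ≤ 100 := by
  unfold pvScore; split_ifs <;> norm_num

lemma loop_stay (query : String) (l : List String) (bm : Option String) (bs : Int)
    (h : ∀ c ∈ l, pvScore query c ≤ bs) : extractOneLoop query l bm bs = (bm, bs) := by
  induction l with
  | nil => rfl
  | cons c rest ih =>
    rw [extractOneLoop_cons]
    have hc := h c (by simp)
    rw [if_neg (by omega)]
    exact ih (fun x hx => h x (by simp [hx]))

lemma loop_100 (query : String) (l : List String) (c : String) (bm : Option String) (bs : Int)
    (hbs : bs < 100) (hf : l.find? (fun c => PySem.Str.lower query == PySem.Str.lower c) = some c) :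
    extractOneLoop query l bm bs = (some c, 100) := by
  induction l generalizing bm bs with
  | nil => simp at hf
  | cons x rest ih =>
    rw [extractOneLoop_cons]
    by_cases hp : PySem.Str.lower query = PySem.Str.lower x
    · rw [List.find?_cons_of_pos (by simpa using hp)] at hf
      obtain rfl : x = c := by injection hf
      have hs : pvScore query x = 100 := by simp [pvScore, hp]
      rw [hs, if_pos hbs]
      exact loop_stay query rest (some x) 100 (fun y _ => pvScore_le_100 query y)
    · rw [List.find?_cons_of_neg (by simpa using hp)] at hf
      have hs : pvScore query x ≤ 80 := by
        unfold pvScore; rw [if_neg hp]; split_ifs <;> norm_num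
      split_ifs with hlt
      · exact ih _ _ (by omega) hf
      · exact ih _ _ hbs hf

lemma loop_80 (query : String) (l : List String) (c : String) (bm : Option String) (bs : Int)
    (hbs : bs < 80)
    (h1 : l.find? (fun c => PySem.Str.lower query == PySem.Str.lower c) = none)
    (hf : l.find? (fun c => PySem.Str.isIn (PySem.Str.lower query) (PySem.Str.lower c)) = some c) :
    extractOneLoop query l bm bs = (some c, 80) := by
  induction l generalizing bm bs with
  | nil => simp at hf
  | cons x rest ih =>
    have hp1 : ¬ PySem.Str.lower query = PySem.Str.lower x := by
      intro he
      rw [List.find?_cons_of_pos (by simpa using he)] at h1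
      simp at h1
    rw [List.find?_cons_of_neg (by simpa using hp1)] at h1
    rw [extractOneLoop_cons]
    by_cases hp : PySem.Str.isIn (PySem.Str.lower query) (PySem.Str.lower x) = true
    · rw [List.find?_cons_of_pos (by simpa using hp)] at hf
      obtain rfl : x = c := by injection hf
      have hs : pvScore query x = 80 := by
        unfold pvScore; rw [if_neg hp1, if_pos hp]
      rw [hs, if_pos hbs]
      apply loop_stay
      intro y hy
      have hny := List.find?_eq_none.mp h1 y hy
      unfold pvScore
      rw [if_neg (by simpa using hny)]
      split_ifs <;> norm_num
    · rw [List.find?_cons_of_neg (by simpa using hp)] at hf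
      have hs : pvScore query x ≤ 70 := by
        unfold pvScore; rw [if_neg hp1, if_neg hp]; split_ifs <;> norm_num
      split_ifs with hlt
      · exact ih _ _ (by omega) h1 hf
      · exact ih _ _ hbs h1 hf

lemma loop_70 (query : String) (l : List String) (c : String) (bm : Option String) (bs : Int)
    (hbs : bs < 70)
    (h1 : l.find? (fun c => PySem.Str.lower query == PySem.Str.lower c) = none)
    (h2 : l.find? (fun c => PySem.Str.isIn (PySem.Str.lower query) (PySem.Str.lower c)) = none)
    (hf : l.find? (fun c => PySem.Str.isIn (PySem.Str.lower c) (PySem.Str.lower query)) = some c) :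
    extractOneLoop query l bm bs = (some c, 70) := by
  induction l generalizing bm bs with
  | nil => simp at hf
  | cons x rest ih =>
    have hp1 : ¬ PySem.Str.lower query = PySem.Str.lower x := by
      intro he
      rw [List.find?_cons_of_pos (by simpa using he)] at h1
      simp at h1
    rw [List.find?_cons_of_neg (by simpa using hp1)] at h1
    have hp2 : ¬ PySem.Str.isIn (PySem.Str.lower query) (PySem.Str.lower x) = true := by
      intro he
      rw [List.find?_cons_of_pos (by simpa using he)] at h2
      simp at h2
    rw [List.find?_cons_of_neg (by simpa using hp2)] at h2
    rw [extractOneLoop_cons]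
    by_cases hp : PySem.Str.isIn (PySem.Str.lower x) (PySem.Str.lower query) = true
    · rw [List.find?_cons_of_pos (by simpa using hp)] at hf
      obtain rfl : x = c := by injection hf
      have hs : pvScore query x = 70 := by
        unfold pvScore; rw [if_neg hp1, if_neg hp2, if_pos hp]
      rw [hs, if_pos hbs]
      apply loop_stay
      intro y hy
      have hny1 := List.find?_eq_none.mp h1 y hy
      have hny2 := List.find?_eq_none.mp h2 y hy
      unfold pvScore
      rw [if_neg (by simpa using hny1), if_neg (by simpa using hny2)]
      split_ifs <;> norm_num
    · rw [List.find?_cons_of_neg (by simpa using hp)] at hf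
      have hs : pvScore query x = 0 := by
        unfold pvScore; rw [if_neg hp1, if_neg hp2, if_neg hp]
      split_ifs with hlt
      · exact ih _ _ (by omega) h1 h2 hf
      · exact ih _ _ hbs h1 h2 hf

lemma loop_none (query : String) (l : List String) (bm : Option String) (bs : Int)
    (hbs : 0 ≤ bs)
    (h1 : l.find? (fun c => PySem.Str.lower query == PySem.Str.lower c) = none)
    (h2 : l.find? (fun c => PySem.Str.isIn (PySem.Str.lower query) (PySem.Str.lower c)) = none)
    (h3 : l.find? (fun c => PySem.Str.isIn (PySem.Str.lower c) (PySem.Str.lower query)) = none) :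
    extractOneLoop query l bm bs = (bm, bs) := by
  apply loop_stay
  intro x hx
  have n1 := List.find?_eq_none.mp h1 x hx
  have n2 := List.find?_eq_none.mp h2 x hx
  have n3 := List.find?_eq_none.mp h3 x hx
  unfold pvScore
  rw [if_neg (by simpa using n1), if_neg (by simpa using n2), if_neg (by simpa using n3)]
  omega

-- ===== VERDICT (by name: the statement is the Claim_ definition above) =====
theorem extractOne_spec : Claim_equal_extractOne := by
  unfold Claim_equal_extractOne
  intro query choices _
  unfold Spec_extractOne extractOne extractOne_alt
  match choices with
  | [] => rfl
  | c0 :: rest =>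
    simp only
    rcases hf1 : (c0 :: rest).find? (fun c => PySem.Str.lower query == PySem.Str.lower c) with _ | c1
    · rcases hf2 : (c0 :: rest).find? (fun c => PySem.Str.isIn (PySem.Str.lower query) (PySem.Str.lower c)) with _ | c2
      · rcases hf3 : (c0 :: rest).find? (fun c => PySem.Str.isIn (PySem.Str.lower c) (PySem.Str.lower query)) with _ | c3
        · rw [loop_none query _ none 0 (by norm_num) hf1 hf2 hf3]
        · rw [loop_70 query _ c3 none 0 (by norm_num) hf1 hf2 hf3]
      · rw [loop_80 query _ c2 none 0 (by norm_num) hf1 hf2]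
    · rw [loop_100 query _ c1 none 0 (by norm_num) hf1]
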